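-- pv_equiv track=rewrite | github.com/pypi-data/pypi-mirror-155 | packages/luxlib/luxlib-0.0.4.tar.gz/luxlib-0.0.4/luxlib/__init__.py | spliter
-- ===== SOURCE A (Python) =====
-- def spliter(dir: str) -> str:
--     final = []
--     temps = ''
--     for elt in dir:
--         if(elt != "/" and elt != "\\"): temps += elt
--         else:
--             final.append(temps)
--             temps = ''
--     string = ''
--     returned = []
--     for line in final:
--         string += line + "/"
--         returned.append(string)
--     return returned
-- ===== SOURCE B (Python) =====
-- def spliter(dir: str) -> str:
--     segs = dir.replace('\\', '/').split('/')[:-1]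
--     return ['/'.join(segs[:i + 1]) + '/' for i in range(len(segs))]
-- ===== Notes on version B (the rewrite author's own statement) =====
-- stated objective: idiomatic
-- what changed: A's two stateful loops (char-by-char accumulator scan, then a running-prefix accumulator) are replaced by a one-shot replace+split into a segment table and a comprehension that recomputes each cumulative prefix independently via slice+join.
import Mathlib
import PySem

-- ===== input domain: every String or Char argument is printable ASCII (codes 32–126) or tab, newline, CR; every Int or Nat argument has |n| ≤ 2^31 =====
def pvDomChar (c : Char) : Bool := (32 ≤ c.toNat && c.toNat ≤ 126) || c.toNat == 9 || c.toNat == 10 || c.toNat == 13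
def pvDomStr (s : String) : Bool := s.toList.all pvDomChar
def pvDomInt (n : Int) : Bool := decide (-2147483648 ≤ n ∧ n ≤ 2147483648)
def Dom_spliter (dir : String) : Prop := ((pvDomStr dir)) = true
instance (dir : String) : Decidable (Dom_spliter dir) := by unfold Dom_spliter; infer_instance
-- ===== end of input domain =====

-- B replaces A's two running-accumulator loops by replace+split into a segment table and an
-- independent join-of-prefix per output entry (objective: idiomatic; a timing run measured B faster).

-- ===== PORT A =====
-- first loop: 'for elt in dir', threading (final, temps); strings built char-by-char kept as List Char
def spliterLoop1 (cs : List Char) (final : List (List Char)) (temps : List Char) :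
    List (List Char) × List Char :=
  match cs with
  | [] => (final, temps)
  | c :: rest =>
    if c ≠ '/' ∧ c ≠ '\\' then spliterLoop1 rest final (temps ++ [c])
    else spliterLoop1 rest (final ++ [temps]) []

-- second loop: 'for line in final', threading (string, returned)
def spliterLoop2 (final : List (List Char)) (string : List Char) (returned : List String) :
    List String :=
  match final with
  | [] => returned
  | line :: rest =>
    spliterLoop2 rest (string ++ line ++ ['/']) (returned ++ [String.mk (string ++ line ++ ['/'])])

def spliter (dir : String) : List String :=
  let p := spliterLoop1 dir.toList [] []
  spliterLoop2 p.1 [] []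

-- ===== PORT B =====
-- Source B: segs = dir.replace('\\','/').split('/')[:-1]; ['/'.join(segs[:i+1]) + '/' for i in range(len(segs))]
def spliter_alt (dir : String) : List String :=
  let segs := (PySem.Chars.splitOn (PySem.Chars.replace dir.toList ['\\'] ['/']) ['/']).dropLast
  (List.range segs.length).map
    (fun i => String.mk (PySem.Chars.join ['/'] (segs.take (i + 1)) ++ ['/']))

-- ===== PRECONDITION & SPEC =====
def Spec_spliter (dir : String) (out : List String) : Prop := out = spliter_alt dir
instance (dir : String) (out : List String) : Decidable (Spec_spliter dir out) := by unfold Spec_spliter; infer_instance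

-- ===== CLAIM (what is proved, stated in full; the proofs are below) =====
def Claim_equal_spliter : Prop := ∀ (dir : String), Dom_spliter dir → Spec_spliter dir (spliter dir)

-- ===== LEMMAS AND PROOFS =====

-- the common split-on-{'/','\\'} specification both ports reduce to
def pvPieces (cs : List Char) : List (List Char) :=
  match cs with
  | [] => [[]]
  | c :: rest =>
    if c = '/' ∨ c = '\\' then [] :: pvPieces rest
    else (pvPieces rest).modifyHead (c :: ·)

theorem pvPieces_ne_nil (cs : List Char) : pvPieces cs ≠ [] := by
  induction cs with
  | nil => simp [pvPieces]
  | cons c rest ih =>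
    simp only [pvPieces]
    split
    · simp
    · cases hp : pvPieces rest with
      | nil => exact absurd hp ih
      | cons p ps => simp [List.modifyHead]

theorem spliterLoop1_eq (cs : List Char) :
    ∀ (final : List (List Char)) (temps : List Char),
      (spliterLoop1 cs final temps).1
        = final ++ ((pvPieces cs).modifyHead (temps ++ ·)).dropLast := by
  induction cs with
  | nil => intro final temps; simp [spliterLoop1, pvPieces]
  | cons c rest ih =>
    intro final temps
    simp only [spliterLoop1, pvPieces]
    by_cases h : c = '/' ∨ c = '\\'
    · have h' : ¬ (c ≠ '/' ∧ c ≠ '\\') := by tauto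
      rw [if_neg h', if_pos h, ih]
      have hne := pvPieces_ne_nil rest
      cases hp : pvPieces rest with
      | nil => exact absurd hp hne
      | cons p ps => simp [List.modifyHead, List.dropLast]
    · have h' : c ≠ '/' ∧ c ≠ '\\' := by tauto
      rw [if_pos h', if_neg h, ih]
      have hne := pvPieces_ne_nil rest
      cases hp : pvPieces rest with
      | nil => exact absurd hp hne
      | cons p ps => simp [List.modifyHead]

theorem spliterLoop2_eq (final : List (List Char)) :
    ∀ (string : List Char) (returned : List String),
      spliterLoop2 final string returned
        = returned ++ (List.range final.length).map
            (fun i => String.mk (string ++ (final.take (i + 1)).flatMap (fun p => p ++ ['/']))) := by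
  induction final with
  | nil => intro string returned; simp [spliterLoop2]
  | cons line rest ih =>
    intro string returned
    simp only [spliterLoop2, ih, List.length_cons, List.range_succ_eq_map, List.map_cons,
      List.map_map]
    simp [List.append_assoc, Function.comp]

theorem replace_single (cs : List Char) :
    PySem.Chars.replace cs ['\\'] ['/'] = cs.map (fun c => if c = '\\' then '/' else c) := by
  have go : ∀ fuel (l acc : List Char), l.length ≤ fuel →
      PySem.Chars.replace.go ['\\'] ['/'] fuel l acc
        = acc.reverse ++ l.map (fun c => if c = '\\' then '/' else c) := by
    intro fuel
    induction fuel with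
    | zero =>
      intro l acc h
      have : l = [] := by cases l <;> simp_all
      subst this; simp [PySem.Chars.replace.go]
    | succ n ih =>
      intro l acc h
      cases l with
      | nil => simp [PySem.Chars.replace.go]
      | cons c t =>
        simp only [PySem.Chars.replace.go]
        by_cases hc : c = '\\'
        · subst hc
          rw [if_pos (by simp [List.isPrefixOf])]
          simp only [List.length_cons] at h
          rw [ih _ _ (by simpa using Nat.le_of_succ_le_succ h)]
          simp
        · rw [if_neg (by simp [List.isPrefixOf]; exact fun h => hc h.symm)]
          simp only [List.length_cons] at h
          rw [ih _ _ (Nat.le_of_succ_le_succ h)]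
          simp [hc]
  simp only [PySem.Chars.replace]
  rw [if_neg (by simp)]
  rw [go _ _ _ (Nat.le_refl _)]
  simp

-- single-char split: the fuel loop of Chars.splitOn computes the structural split
def pvSplitSl (cs : List Char) : List (List Char) :=
  match cs with
  | [] => [[]]
  | c :: rest =>
    if c = '/' then [] :: pvSplitSl rest
    else (pvSplitSl rest).modifyHead (c :: ·)

theorem pvSplitSl_ne_nil (cs : List Char) : pvSplitSl cs ≠ [] := by
  induction cs with
  | nil => simp [pvSplitSl]
  | cons c rest ih =>
    simp only [pvSplitSl]
    split
    · simp
    · cases hp : pvSplitSl rest with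
      | nil => exact absurd hp ih
      | cons p ps => simp [List.modifyHead]

theorem splitOn_single (cs : List Char) :
    PySem.Chars.splitOn cs ['/'] = pvSplitSl cs := by
  have go : ∀ fuel (l cur : List Char) (acc : List (List Char)), l.length ≤ fuel →
      PySem.Chars.splitOn.go ['/'] fuel l cur acc
        = acc.reverse ++ (pvSplitSl l).modifyHead (cur.reverse ++ ·) := by
    intro fuel
    induction fuel with
    | zero =>
      intro l cur acc h
      have : l = [] := by cases l <;> simp_all
      subst this; simp [PySem.Chars.splitOn.go, pvSplitSl, List.modifyHead]
    | succ n ih =>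
      intro l cur acc h
      cases l with
      | nil => simp [PySem.Chars.splitOn.go, pvSplitSl, List.modifyHead]
      | cons c t =>
        simp only [PySem.Chars.splitOn.go]
        simp only [List.length_cons] at h
        by_cases hc : c = '/'
        · subst hc
          rw [if_pos (by simp [List.isPrefixOf])]
          simp only [List.length_singleton, List.drop_succ_cons, List.drop_zero]
          rw [ih _ _ _ (Nat.le_of_succ_le_succ h)]
          have hne := pvSplitSl_ne_nil t
          cases hp : pvSplitSl t with
          | nil => exact absurd hp hne
          | cons p ps =>
            have h1 : pvSplitSl ('/' :: t) = [] :: pvSplitSl t := by simp [pvSplitSl]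
            rw [h1, hp]
            simp [List.modifyHead_cons, List.append_assoc]
        · rw [if_neg (by simp [List.isPrefixOf]; exact fun h => hc h.symm)]
          rw [ih _ _ _ (Nat.le_of_succ_le_succ h)]
          have hne := pvSplitSl_ne_nil t
          cases hp : pvSplitSl t with
          | nil => exact absurd hp hne
          | cons p ps =>
            have h1 : pvSplitSl (c :: t) = (c :: p) :: ps := by
              simp [pvSplitSl, hc, hp, List.modifyHead]
            rw [h1]
            simp only [List.modifyHead_cons]
            simp
  simp only [PySem.Chars.splitOn]
  rw [go _ _ _ _ (Nat.le_succ _)]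
  have hne := pvSplitSl_ne_nil cs
  cases hp : pvSplitSl cs with
  | nil => exact absurd hp hne
  | cons p ps => simp [List.modifyHead]

theorem splitSl_map_eq_pieces (cs : List Char) :
    pvSplitSl (cs.map (fun c => if c = '\\' then '/' else c)) = pvPieces cs := by
  induction cs with
  | nil => rfl
  | cons c rest ih =>
    by_cases hc : c = '\\'
    · subst hc; simp [pvSplitSl, pvPieces, ih]
    · by_cases hs : c = '/'
      · subst hs; simp [pvSplitSl, pvPieces, ih]
      · simp [pvSplitSl, pvPieces, hc, hs, ih]

theorem intercalate_append_slash (xs : List (List Char)) (h : xs ≠ []) :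
    List.intercalate ['/'] xs ++ ['/'] = xs.flatMap (fun p => p ++ ['/']) := by
  induction xs with
  | nil => exact absurd rfl h
  | cons a xs ih =>
    cases xs with
    | nil => simp [List.intercalate]
    | cons b ys =>
      have : List.intercalate ['/'] (a :: b :: ys) = a ++ ['/'] ++ List.intercalate ['/'] (b :: ys) := by
        simp [List.intercalate, List.intersperse]
      rw [this]
      simp only [List.flatMap_cons]
      rw [List.append_assoc, List.append_assoc, ih (by simp)]
      simp

-- ===== VERDICT (by name: the statement is the Claim_ definition above) =====
theorem spliter_spec : Claim_equal_spliter := by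
  intro dir _
  unfold Spec_spliter spliter spliter_alt
  dsimp only
  rw [replace_single, splitOn_single, splitSl_map_eq_pieces]
  rw [spliterLoop1_eq]
  have hne := pvPieces_ne_nil dir.toList
  have hmh : (pvPieces dir.toList).modifyHead (([] : List Char) ++ ·) = pvPieces dir.toList := by
    cases hp : pvPieces dir.toList with
    | nil => exact absurd hp hne
    | cons p ps => simp [List.modifyHead]
  rw [List.nil_append, hmh, spliterLoop2_eq]
  simp only [List.nil_append]
  apply List.map_congr_left
  intro i hi
  rw [List.mem_range] at hi
  congr 1
  rw [PySem.Chars.join]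
  rw [intercalate_append_slash]
  intro hnil
  have hlen : (((pvPieces dir.toList).dropLast).take (i + 1)).length = 0 := by rw [hnil]; rfl
  rw [List.length_take] at hlen
  omega
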